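-- pv_equiv track=rewrite | github.com/navrajan05/CS-UY-1134 | Homework/HW 4/nkr9876_hw4_q6.py | appearances
-- ===== SOURCE A (Python) =====
-- def appearances(s, low, high):
--     if low > high:
--         return {}
--     else:
--         log = appearances(s, low + 1, high)
--         char = s[low]
--
--         if char in log:
--             log[char] += 1
--         else:
--             log[char] = 1
--
--         return log
-- ===== SOURCE B (Python) =====
-- def appearances(s, low, high):
--     # Iterative re-implementation: one loop over the indices high..low
--     # (the order in which A's recursion first inserts each character),
--     # building a plain dict with get-or-default instead of recursion.
--     log = {}
--     for i in range(high, low - 1, -1):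
--         c = s[i]
--         log[c] = log.get(c, 0) + 1
--     return log
-- ===== Notes on version B (the rewrite author's own statement) =====
-- stated objective: simpler
-- what changed: Replaces the O(n)-deep recursion with a single iterative loop over range(high, low-1, -1) that updates a dict via get-or-default, removing the base-case/branching structure (and the recursion-depth limit).
import Mathlib
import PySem

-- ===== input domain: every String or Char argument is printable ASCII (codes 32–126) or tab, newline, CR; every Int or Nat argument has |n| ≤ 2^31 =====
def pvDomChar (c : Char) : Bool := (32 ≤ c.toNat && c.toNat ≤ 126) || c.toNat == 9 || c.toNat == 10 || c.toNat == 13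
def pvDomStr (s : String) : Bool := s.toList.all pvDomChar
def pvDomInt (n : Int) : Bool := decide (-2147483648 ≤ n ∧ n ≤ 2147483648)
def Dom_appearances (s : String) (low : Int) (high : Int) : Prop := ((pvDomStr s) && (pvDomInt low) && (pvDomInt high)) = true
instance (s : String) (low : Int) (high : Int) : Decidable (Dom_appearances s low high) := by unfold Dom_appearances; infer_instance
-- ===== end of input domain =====

-- B replaces A's recursion with a single iterative loop over the indices high..low
-- (the order A first inserts each character), updating a dict by get-or-default: simpler, no recursion.


-- ===== PORT A =====
-- s[low] gives a 1-character string in Python: Char from PySem.Str.pyGet?, wrapped as String.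
-- The .getD "" default is dead code under Pre_ (every accessed index is in range there).
def pvCharAt (s : String) (i : Int) : String :=
  ((PySem.Str.pyGet? s i).map (fun c => String.ofList [c])).getD ""

def appearancesDictA (s : String) (low : Int) (high : Int) : PySem.Dict String Int :=
  if low > high then PySem.Dict.empty
  else
    let log := appearancesDictA s (low + 1) high
    let char := pvCharAt s low
    if log.contains char then
      log.insert char (log.getD char 0 + 1)
    else
      log.insert char 1
termination_by (high + 1 - low).toNat
decreasing_by omega

def appearances (s : String) (low : Int) (high : Int) : List (String × Int) :=
  (appearancesDictA s low high).items

-- ===== PORT B =====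
def appearances_alt (s : String) (low : Int) (high : Int) : List (String × Int) :=
  ((PySem.List.pyRange high (low - 1) (-1)).foldl
    (fun log i =>
      let c := pvCharAt s i
      log.insert c (log.getD c 0 + 1)) PySem.Dict.empty).items

-- ===== PRECONDITION & SPEC =====
-- Pre_ excludes exactly the inputs where Python's s[i] raises IndexError for some i in [low, high].
def Pre_appearances (s : String) (low : Int) (high : Int) : Prop :=
  low > high ∨ (-(PySem.Str.len s) ≤ low ∧ high < PySem.Str.len s)
instance (s : String) (low : Int) (high : Int) : Decidable (Pre_appearances s low high) := by
  unfold Pre_appearances; infer_instance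

def pvWitness_appearances : String × Int × Int := ("abca", 0, 3)

def Spec_appearances (s : String) (low : Int) (high : Int) (out : List (String × Int)) : Prop := out = appearances_alt s low high
instance (s : String) (low : Int) (high : Int) (out : List (String × Int)) : Decidable (Spec_appearances s low high out) := by unfold Spec_appearances; infer_instance

-- ===== CLAIM (what is proved, stated in full; the proofs are below) =====
def Claim_equal_appearances : Prop := ∀ (s : String) (low : Int) (high : Int), Dom_appearances s low high → Pre_appearances s low high → Spec_appearances s low high (appearances s low high)

-- ===== LEMMAS AND PROOFS =====

-- A's branch on `char in log` computes the same dict as B's unconditional get-or-default update.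
lemma step_eq (log : PySem.Dict String Int) (char : String) :
    (if log.contains char then log.insert char (log.getD char 0 + 1)
     else log.insert char 1)
    = log.insert char (log.getD char 0 + 1) := by
  by_cases h : log.contains char = true
  · simp [h]
  · simp only [Bool.not_eq_true] at h
    simp [h, PySem.Dict.getD_of_not_contains (h := h)]

-- A's recursion unfolds to B's left fold over the countdown range high..low.
lemma appearancesDictA_eq_foldl (s : String) (low high : Int) :
    appearancesDictA s low high
      = (PySem.List.pyRange high (low - 1) (-1)).foldl
          (fun log i => log.insert (pvCharAt s i) (log.getD (pvCharAt s i) 0 + 1))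
          PySem.Dict.empty := by
  induction hn : (high + 1 - low).toNat generalizing low with
  | zero =>
    have hlh : low > high := by omega
    rw [appearancesDictA, if_pos hlh, PySem.List.pyRange_neg_one_eq_nil (by omega)]
    rfl
  | succ n ih =>
    have hlh : ¬ low > high := by omega
    have hsplit : PySem.List.pyRange high (low - 1) (-1)
        = PySem.List.pyRange high low (-1) ++ [low] := by
      rw [PySem.List.pyRange_neg_one_eq_reverse, PySem.List.pyRange_neg_one_eq_reverse]
      have : low - 1 + 1 = low := by ring
      rw [this, PySem.List.pyRange_one_cons (by omega)]
      simp
    rw [appearancesDictA, if_neg hlh, hsplit, List.foldl_append]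
    have hrec : PySem.List.pyRange high low (-1)
        = PySem.List.pyRange high ((low + 1) - 1) (-1) := by norm_num
    rw [hrec, ← ih (low + 1) (by omega)]
    simp only [List.foldl_cons, List.foldl_nil]
    exact step_eq _ _

-- ===== VERDICT (by name: the statement is the Claim_ definition above) =====
theorem appearances_spec : Claim_equal_appearances := by
  intro s low high _ _
  unfold Spec_appearances appearances appearances_alt
  rw [appearancesDictA_eq_foldl]
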